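-- pv_equiv track=rewrite | github.com/SleepyCloud023/coding-test-study-note | Greedy/boj_2212/boj_2212.py | solution
-- ===== SOURCE A (Python) =====
-- def solution(num_wifi: int, sensor_list: list):
--     sensor_list.sort()
--
--     num_sensor = len(sensor_list)
--     if num_sensor == 1:
--         return 0
--
--     diff_list = []
--
--     for i in range(1, num_sensor):
--         diff = sensor_list[i] - sensor_list[i-1]
--         diff_list.append(diff)
--     diff_list.sort()
--
--     result = sensor_list[-1] - sensor_list[0]
--     if num_wifi > 1:
--         cut_count = num_wifi - 1
--         result -= sum(diff_list[-cut_count:])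
--
--     return result
-- ===== SOURCE B (Python) =====
-- def solution(num_wifi: int, sensor_list: list):
--     sensor_list.sort()
--     gaps = [b - a for a, b in zip(sensor_list, sensor_list[1:])]
--     cuts = num_wifi - 1
--     while cuts > 0 and gaps:
--         gaps.remove(max(gaps))
--         cuts -= 1
--     return sum(gaps)
-- ===== Notes on version B (the rewrite author's own statement) =====
-- stated objective: alternative
-- what changed: B never sorts the gap list: it repeatedly removes the current maximum gap (num_wifi-1 linear max-extraction passes) and returns the sum of the gaps that remain, instead of A's sort-the-gaps then range-minus-top-slice computation.
import Mathlib
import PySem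

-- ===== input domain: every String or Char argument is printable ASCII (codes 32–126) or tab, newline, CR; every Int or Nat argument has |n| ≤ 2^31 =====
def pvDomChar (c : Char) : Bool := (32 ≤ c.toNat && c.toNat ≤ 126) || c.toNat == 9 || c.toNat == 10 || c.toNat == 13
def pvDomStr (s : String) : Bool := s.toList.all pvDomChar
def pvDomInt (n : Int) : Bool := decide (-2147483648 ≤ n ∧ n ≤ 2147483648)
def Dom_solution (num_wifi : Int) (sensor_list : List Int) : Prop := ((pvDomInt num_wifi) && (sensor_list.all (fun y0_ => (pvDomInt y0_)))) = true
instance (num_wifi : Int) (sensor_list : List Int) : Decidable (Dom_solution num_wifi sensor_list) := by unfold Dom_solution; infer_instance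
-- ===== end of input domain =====

-- B removes the maximum gap one at a time (num_wifi-1 linear scans, no sorting of the gaps) and sums the remainder, instead of A's sort-the-gaps range-minus-top-slice; same return value. Both sort sensor_list in place; the equivalence proved is about the return value.


-- ===== PORT A =====
-- Indices used by A are valid whenever sensor_list ≠ [] (Pre_), so '.getD 0' never fires inside Pre_.
def solution (num_wifi : Int) (sensor_list : List Int) : Int :=
  let s := PySem.List.sorted sensor_list (fun x => x) false
  let n : Int := s.length
  if n = 1 then 0
  else
    let diff_list := (PySem.List.pyRange 1 n 1).foldl
      (fun acc i => acc ++ [(PySem.List.pyGet? s i).getD 0 - (PySem.List.pyGet? s (i - 1)).getD 0]) []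
    let diff_sorted := PySem.List.sorted diff_list (fun x => x) false
    let result := (PySem.List.pyGet? s (-1)).getD 0 - (PySem.List.pyGet? s 0).getD 0
    if num_wifi > 1 then
      let cut_count := num_wifi - 1
      result - (PySem.List.slice diff_sorted (some (-cut_count)) none).sum
    else result

-- ===== PORT B =====
-- the 'while cuts > 0 and gaps: gaps.remove(max(gaps)); cuts -= 1' loop; the countdown 'cuts' is encoded as the
-- Nat fuel (num_wifi - 1).toNat, which performs exactly the same iterations. 'max(gaps)' is some since gaps ≠ []
-- in the loop, and remove? never misses (the max is a member), so '.getD gaps' never fires.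
def cutLoop (cuts : Nat) (gaps : List Int) : List Int :=
  match cuts with
  | 0 => gaps
  | c + 1 =>
    if gaps ≠ [] then
      match PySem.List.max? gaps (fun x => x) with
      | some m => cutLoop c ((PySem.List.remove? gaps m).getD gaps)
      | none => gaps
    else gaps

def solution_alt (num_wifi : Int) (sensor_list : List Int) : Int :=
  let s := PySem.List.sorted sensor_list (fun x => x) false
  let gaps := (s.zip (PySem.List.slice s (some 1) none)).map (fun p => p.2 - p.1)
  (cutLoop (num_wifi - 1).toNat gaps).sum

-- ===== PRECONDITION & SPEC =====
-- Pre_ excludes only the empty list, on which A raises IndexError at sensor_list[-1].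
def Pre_solution (num_wifi : Int) (sensor_list : List Int) : Prop := sensor_list ≠ []
instance (num_wifi : Int) (sensor_list : List Int) : Decidable (Pre_solution num_wifi sensor_list) := by unfold Pre_solution; infer_instance
def pvWitness_solution : Int × List Int := (2, [1, 6, 9])

def Spec_solution (num_wifi : Int) (sensor_list : List Int) (out : Int) : Prop := out = solution_alt num_wifi sensor_list
instance (num_wifi : Int) (sensor_list : List Int) (out : Int) : Decidable (Spec_solution num_wifi sensor_list out) := by unfold Spec_solution; infer_instance

-- ===== CLAIM (what is proved, stated in full; the proofs are below) =====
def Claim_equal_solution : Prop := ∀ (num_wifi : Int) (sensor_list : List Int), Dom_solution num_wifi sensor_list → Pre_solution num_wifi sensor_list → Spec_solution num_wifi sensor_list (solution num_wifi sensor_list)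

-- ===== LEMMAS AND PROOFS =====

lemma diffs_eq (s : List Int) :
    (PySem.List.pyRange 1 (s.length : Int) 1).map
      (fun i => (PySem.List.pyGet? s i).getD 0 - (PySem.List.pyGet? s (i - 1)).getD 0)
    = (s.zip (s.drop 1)).map (fun p => p.2 - p.1) := by
  rw [PySem.List.pyRange_one, List.map_map]
  have hlen : ((s.length : Int) - 1).toNat = s.length - 1 := by omega
  rw [hlen]
  apply List.ext_getElem
  · simp
  · intro k h1 h2
    simp only [List.getElem_map, List.getElem_range, Function.comp_apply]
    have hk : k + 1 < s.length := by simp at h1; omega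
    have e1 : (1 : Int) + k = ((k+1 : Nat) : Int) := by push_cast; ring
    have e2 : ((k+1 : Nat) : Int) - 1 = ((k : Nat) : Int) := by push_cast; ring
    rw [e1, e2, PySem.List.pyGet?_natCast, PySem.List.pyGet?_natCast,
      List.getElem?_eq_getElem hk, List.getElem?_eq_getElem (by omega : k < s.length)]
    simp [List.getElem_zip]

lemma tele (a : Int) (s : List Int) :
    (((a :: s).zip s).map (fun p => p.2 - p.1)).sum = s.getLastD a - a := by
  induction s generalizing a with
  | nil => simp
  | cons b t ih =>
    rw [List.getLastD_cons]
    have := ih b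
    simp only [List.zip_cons_cons, List.map_cons, List.sum_cons] at this ⊢
    omega

lemma cons_getElem_last (a : Int) (rest : List Int) : (a :: rest)[rest.length] = rest.getLastD a := by
  induction rest generalizing a with
  | nil => rfl
  | cons b t ih => rw [List.getLastD_cons]; simpa using ih b

lemma pyget_neg_one (a : Int) (rest : List Int) : (PySem.List.pyGet? (a::rest) (-1)).getD 0 = rest.getLastD a := by
  have := cons_getElem_last a rest
  simp [PySem.List.pyGet?, PySem.List.pyIdx?] at this ⊢
  exact this

-- erasing the (first occurrence of the) maximum is, as a sorted list, dropping the last element of the sorted list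
lemma sorted_erase_max (g : List Int) (m : Int) (hm : PySem.List.max? g (fun x => x) = some m) :
    PySem.List.sorted (g.erase m) (fun x => x) false
      = (PySem.List.sorted g (fun x => x) false).dropLast := by
  set sg := PySem.List.sorted g (fun x => x) false with hsg
  have hperm : sg.Perm g := PySem.List.sorted_perm g (fun x => x) false
  have hmem : m ∈ g := PySem.List.max?_mem hm
  have hne : sg ≠ [] := by
    intro h
    rw [hsg, PySem.List.sorted_eq_nil_iff] at h
    simp [h] at hmem
  have hsplit : sg = sg.dropLast ++ [sg.getLast hne] := (List.dropLast_append_getLast hne).symm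
  have hpw : sg.Pairwise (fun a b => a ≤ b) := PySem.List.sorted_pairwise g (fun x => x)
  have hlast_eq : sg.getLast hne = m := by
    have h1 : sg.getLast hne ≤ m := PySem.List.max?_isMax hm _ (hperm.mem_iff.mp (List.getLast_mem hne))
    have h2 : m ≤ sg.getLast hne := by
      have hmsg : m ∈ sg := hperm.mem_iff.mpr hmem
      rw [hsplit] at hpw hmsg
      rcases List.mem_append.mp hmsg with h | h
      · exact (List.pairwise_append.mp hpw).2.2 m h _ (List.mem_singleton_self _)
      · simp at h; omega
    omega
  have hperase : sg.dropLast.Perm (g.erase m) := by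
    have h1 : (g.erase m).Perm (sg.erase m) := (hperm.erase m).symm
    have h2 : sg.erase m = (sg.dropLast ++ [m]).erase m := by rw [← hlast_eq, ← hsplit]
    have h3 : (sg.dropLast ++ [m]).Perm (m :: sg.dropLast) := List.perm_append_singleton m sg.dropLast
    have h4 : ((sg.dropLast ++ [m]).erase m).Perm ((m :: sg.dropLast).erase m) := h3.erase m
    rw [List.erase_cons_head] at h4
    exact ((h1.trans (h2 ▸ h4)).symm)
  exact PySem.List.sorted_id_eq_of_perm_of_pairwise _ _ hperase
    (hpw.sublist (List.dropLast_sublist sg))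

lemma cutLoop_sum (cuts : Nat) (g : List Int) :
    (cutLoop cuts g).sum
      = ((PySem.List.sorted g (fun x => x) false).take
          ((PySem.List.sorted g (fun x => x) false).length - cuts)).sum := by
  induction cuts generalizing g with
  | zero =>
    rw [cutLoop, Nat.sub_zero, List.take_length]
    exact ((PySem.List.sorted_perm g (fun x => x) false).sum_eq).symm
  | succ c ih =>
    rw [cutLoop]
    by_cases hg : g = []
    · simp [hg, PySem.List.sorted]
    · rw [if_pos hg]
      obtain ⟨m, hm⟩ : ∃ m, PySem.List.max? g (fun x => x) = some m := by
        cases hmx : PySem.List.max? g (fun x => x) with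
        | none => exact absurd ((PySem.List.max?_eq_none_iff _ _).mp hmx) hg
        | some m => exact ⟨m, rfl⟩
      have hmem : m ∈ g := PySem.List.max?_mem hm
      rw [hm]
      simp only [PySem.List.remove?_eq_some_erase g m hmem, Option.getD_some]
      rw [ih, sorted_erase_max g m hm]
      set sg := PySem.List.sorted g (fun x => x) false with hsg
      have hne : sg ≠ [] := by
        intro hnil
        rw [hsg, PySem.List.sorted_eq_nil_iff] at hnil
        simp [hnil] at hmem
      have hlpos : 0 < sg.length := List.length_pos_iff.mpr hne
      rw [List.dropLast_eq_take, List.take_take, List.length_take]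
      congr 2
      omega

lemma solution_eq_alt (w : Int) (xs : List Int) (hne : xs ≠ []) : solution w xs = solution_alt w xs := by
  unfold solution solution_alt
  dsimp only
  set s := PySem.List.sorted xs (fun x => x) false with hs
  have hsne : s ≠ [] := by
    intro h
    have hp := PySem.List.sorted_perm xs (fun x => x) false
    rw [← hs, h] at hp
    exact hne hp.nil_eq.symm
  obtain ⟨a, rest, hsl⟩ : ∃ a rest, s = a :: rest := by
    cases h : s with
    | nil => exact absurd h hsne
    | cons a rest => exact ⟨a, rest, rfl⟩
  rw [PySem.List.foldl_append_singleton_eq_map]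
  rw [show PySem.List.slice s (some 1) none = s.drop 1 from by
        rw [PySem.List.slice_from_one, List.drop_one]]
  rw [diffs_eq s]
  simp only [List.nil_append]
  set g0 := (s.zip (s.drop 1)).map (fun p => p.2 - p.1) with hg0
  rw [cutLoop_sum]
  set g := PySem.List.sorted g0 (fun x => x) false with hg
  have hg0len : g0.length = rest.length := by simp [hg0, hsl]
  have hglen : g.length = rest.length := by
    rw [hg, PySem.List.length_sorted, hg0len]
  have hsum : g.sum = rest.getLastD a - a := by
    rw [hg, (PySem.List.sorted_perm g0 (fun x => x) false).sum_eq, hg0, hsl]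
    simpa using tele a rest
  have hrange : (PySem.List.pyGet? s (-1)).getD 0 - (PySem.List.pyGet? s 0).getD 0
      = rest.getLastD a - a := by
    rw [hsl, pyget_neg_one]
    simp [PySem.List.pyGet?, PySem.List.pyIdx?]
  by_cases h1 : (s.length : Int) = 1
  · -- n = 1 : rest = [], no gaps on either side
    have hr0 : rest = [] := by rw [hsl] at h1; simpa using h1
    have hgnil : g = [] := by
      have : g.length = 0 := by rw [hglen, hr0]; rfl
      exact List.length_eq_zero_iff.mp this
    rw [if_pos h1, hgnil]
    simp
  · rw [if_neg h1]
    have hrlen : 1 ≤ rest.length := by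
      rcases Nat.eq_zero_or_pos rest.length with h | h
      · exfalso; apply h1; rw [hsl]; simp [h]
      · exact h
    by_cases hw : w > 1
    · rw [if_pos hw]
      have hcut : -(w - 1) = -(((w - 1).toNat : Nat) : Int) := by omega
      rw [hcut, PySem.List.slice_from_neg_natCast _ _ (by omega)]
      rw [hrange, ← hsum]
      have := List.sum_take_add_sum_drop g (g.length - (w - 1).toNat)
      omega
    · rw [if_neg hw]
      have h0 : (w - 1).toNat = 0 := by omega
      rw [h0, Nat.sub_zero, List.take_length, hrange, hsum]

-- ===== VERDICT (by name: the statement is the Claim_ definition above) =====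
theorem solution_spec : Claim_equal_solution := by
  intro num_wifi sensor_list _ hne
  exact solution_eq_alt num_wifi sensor_list hne
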